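-- pv_equiv track=rewrite | github.com/Nwntastaliadouros/assignment-2016-3- | musical_rythms.py | vspace
-- ===== SOURCE A (Python) =====
-- def vspace(xx):
--     # It accepts the simple list xx - returns vector space
--     ld=[]
--     fn=0
--     for i in range(1,len(xx)):
--         if (xx[i]==1):
--             ld.append(i-fn)
--             fn=i
--     #######################
--     if (xx[len(xx)-1]==1):
--         ld.append(1)
--     else:
--         ddd=len(xx)-fn
--         ld.append(ddd)
--     return(ld)
-- ===== SOURCE B (Python) =====
-- def vspace(xx):
--     # Partition the tail of xx into runs separated by 1s, then map each run
--     # to its length + 1.  Returns [1] on the empty list (where A raises).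
--     chunks = [[]]
--     for v in xx[1:]:
--         if v == 1:
--             chunks.append([])
--         else:
--             chunks[-1].append(v)
--     return [len(c) + 1 for c in chunks]
-- ===== Notes on version B (the rewrite author's own statement) =====
-- stated objective: alternative
-- what changed: Instead of scanning indices and differencing one-positions with a last-seen accumulator and a final-element special case, B partitions the tail of the list into runs separated by 1s and maps each run to its length + 1; the final-element branch disappears entirely (an empty trailing run yields the extra 1).
import Mathlib
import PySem

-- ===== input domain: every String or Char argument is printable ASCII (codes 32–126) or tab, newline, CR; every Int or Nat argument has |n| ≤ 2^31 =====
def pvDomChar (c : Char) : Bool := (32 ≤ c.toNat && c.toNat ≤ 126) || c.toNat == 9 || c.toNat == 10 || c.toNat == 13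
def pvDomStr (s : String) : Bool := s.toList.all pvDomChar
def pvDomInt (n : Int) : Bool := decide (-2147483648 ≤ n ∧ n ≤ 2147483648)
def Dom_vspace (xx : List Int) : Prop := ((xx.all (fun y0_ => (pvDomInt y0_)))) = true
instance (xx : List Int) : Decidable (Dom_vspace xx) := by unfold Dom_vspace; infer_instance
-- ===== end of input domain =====

-- B replaces A's index scan (differencing one-positions with a last-seen accumulator and a
-- final-element special case) by partitioning the tail into runs separated by 1s and mapping
-- each run to its length + 1; objective: alternative decomposition, same cost.

-- ===== PORT A =====
-- fused scan: state (ld, fn) over range(1, len(xx)); xx[i] is in range for those i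
def vspace (xx : List Int) : List Int :=
  let n : Int := xx.length
  let st : List Int × Int :=
    (PySem.List.pyRange 1 n 1).foldl
      (fun (s : List Int × Int) i =>
        if PySem.List.pyGetD xx i 0 = 1 then (s.1 ++ [i - s.2], i) else s)
      ([], 0)
  -- xx[len(xx)-1]: in range whenever xx ≠ [] (Pre_); the default is never used there
  if PySem.List.pyGetD xx (n - 1) 0 = 1 then st.1 ++ [1]
  else st.1 ++ [n - st.2]

-- ===== PORT B =====
-- chunks = [[]]; for v in xx[1:]: start a new chunk on a 1, else extend the last chunk;
-- then map each chunk to len(chunk) + 1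
def vspace_alt (xx : List Int) : List Int :=
  let chunks : List (List Int) :=
    (xx.drop 1).foldl
      (fun (cs : List (List Int)) v =>
        if v = 1 then cs ++ [[]] else cs.dropLast ++ [(cs.getLastD []) ++ [v]])
      [[]]
  chunks.map (fun c => (c.length : Int) + 1)

-- ===== PRECONDITION & SPEC =====
-- Pre_ excludes only the empty list, on which Python A raises IndexError at xx[len(xx)-1].
def Pre_vspace (xx : List Int) : Prop := xx ≠ []
instance (xx : List Int) : Decidable (Pre_vspace xx) := by unfold Pre_vspace; infer_instance
def pvWitness_vspace : List Int := ([1, 0, 1])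

def Spec_vspace (xx : List Int) (out : List Int) : Prop := out = vspace_alt xx
instance (xx : List Int) (out : List Int) : Decidable (Spec_vspace xx out) := by unfold Spec_vspace; infer_instance

-- ===== CLAIM (what is proved, stated in full; the proofs are below) =====
def Claim_equal_vspace : Prop := ∀ (xx : List Int), Dom_vspace xx → Pre_vspace xx → Spec_vspace xx (vspace xx)

-- ===== LEMMAS AND PROOFS =====

-- structural model of A's loop over the tail (i = current index, state (ld, fn))
def loopA : List Int → Int → List Int × Int → List Int × Int
  | [], _, s => s
  | v :: t, i, s => loopA t (i + 1) (if v = 1 then (s.1 ++ [i - s.2], i) else s)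

-- common gap sequence both programs compute (c = current gap counter)
def gaps : Int → List Int → List Int
  | c, [] => [c]
  | c, v :: t => if v = 1 then c :: gaps 1 t else gaps (c + 1) t

-- tail-recursive model of B's chunk-building loop
def splitAux : List Int → List Int → List (List Int)
  | cur, [] => [cur]
  | cur, v :: t => if v = 1 then cur :: splitAux [] t else splitAux (cur ++ [v]) t

theorem bridgeA (t : List Int) : ∀ (u : List Int) (s : List Int × Int),
    (PySem.List.pyRange (u.length : Int) ((u.length : Int) + (t.length : Int)) 1).foldl
      (fun (s : List Int × Int) i =>
        if PySem.List.pyGetD (u ++ t) i 0 = 1 then (s.1 ++ [i - s.2], i) else s) s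
    = loopA t (u.length : Int) s := by
  induction t with
  | nil => intro u s; rw [PySem.List.pyRange_one_eq_nil (by simp)]; rfl
  | cons v t ih =>
    intro u s
    rw [PySem.List.pyRange_one_cons (by push_cast [List.length_cons]; omega), List.foldl_cons]
    have hget : PySem.List.pyGetD (u ++ v :: t) (u.length : Int) 0 = v := by
      simp [PySem.List.pyGetD_natCast, List.getD]
    rw [hget, show u ++ v :: t = (u ++ [v]) ++ t by simp]
    have := ih (u ++ [v]) (if v = 1 then (s.1 ++ [(u.length : Int) - s.2], (u.length : Int)) else s)
    rw [show (((u ++ [v]).length : Nat) : Int) = (u.length : Int) + 1 by simp] at this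
    rw [show ((u.length : Int) + ((v :: t).length : Int)) = ((u.length : Int) + 1) + (t.length : Int) by simp; ring]
    simpa [loopA] using this

theorem loopA_gaps (t : List Int) : t ≠ [] → ∀ (i fn : Int) (acc : List Int),
    (if t.getLastD 0 = 1 then (loopA t i (acc, fn)).1 ++ [1]
     else (loopA t i (acc, fn)).1 ++ [(i + (t.length : Int)) - (loopA t i (acc, fn)).2])
    = acc ++ gaps (i - fn) t := by
  induction t with
  | nil => intro h; exact absurd rfl h
  | cons v t ih =>
    intro _ i fn acc
    rcases eq_or_ne t [] with rfl | ht
    · by_cases hv : v = 1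
      · subst hv; simp [loopA, gaps]
      · simp [loopA, gaps, hv]; ring
    · have hlast : (v :: t).getLastD 0 = t.getLastD 0 := by
        cases t with
        | nil => exact absurd rfl ht
        | cons w r => simp
      by_cases hv : v = 1
      · subst hv
        have h2 := ih ht (i + 1) i (acc ++ [i - fn])
        rw [show (i + 1) - i = 1 by ring] at h2
        simp only [loopA, if_true, hlast, gaps, List.length_cons]
        rw [show (i + ((t.length + 1 : Nat) : Int)) = (i + 1) + (t.length : Int) by push_cast; ring]
        rw [h2]; simp
      · simp only [loopA, if_neg hv, hlast, gaps, List.length_cons]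
        have h2 := ih ht (i + 1) fn acc
        rw [show (i + 1) - fn = i - fn + 1 by ring] at h2
        rw [show (i + ((t.length + 1 : Nat) : Int)) = (i + 1) + (t.length : Int) by push_cast; ring]
        rw [h2]

theorem foldl_splitAux (t : List Int) : ∀ (done : List (List Int)) (cur : List Int),
    t.foldl
      (fun (cs : List (List Int)) v =>
        if v = 1 then cs ++ [[]] else cs.dropLast ++ [(cs.getLastD []) ++ [v]])
      (done ++ [cur])
    = done ++ splitAux cur t := by
  induction t with
  | nil => intro done cur; simp [splitAux]
  | cons v t ih =>
    intro done cur
    by_cases hv : v = 1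
    · subst hv
      simp only [List.foldl_cons, if_true, splitAux]
      rw [show done ++ [cur] ++ [[]] = (done ++ [cur]) ++ [([] : List Int)] by simp]
      rw [ih (done ++ [cur]) []]
      simp
    · simp only [List.foldl_cons, if_neg hv, splitAux]
      rw [List.dropLast_concat, List.getLastD_concat, ih done (cur ++ [v])]

theorem splitAux_gaps (t : List Int) : ∀ (cur : List Int),
    (splitAux cur t).map (fun c => (c.length : Int) + 1) = gaps ((cur.length : Int) + 1) t := by
  induction t with
  | nil => intro cur; simp [splitAux, gaps]
  | cons v t ih =>
    intro cur
    by_cases hv : v = 1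
    · subst hv
      simp only [splitAux, if_true, gaps, List.map_cons]
      rw [ih []]
      simp
    · simp only [splitAux, if_neg hv, gaps]
      rw [ih (cur ++ [v])]
      congr 1
      simp

theorem alt_eq_gaps (xx : List Int) : vspace_alt xx = gaps 1 (xx.drop 1) := by
  unfold vspace_alt
  have h := foldl_splitAux (xx.drop 1) [] []
  simp only [List.nil_append] at h
  rw [h, splitAux_gaps]
  norm_num

theorem main_eq (xx : List Int) (hne : xx ≠ []) : vspace xx = vspace_alt xx := by
  rw [alt_eq_gaps]
  obtain ⟨x, t, rfl⟩ : ∃ x t, xx = x :: t := by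
    cases xx with
    | nil => exact absurd rfl hne
    | cons x t => exact ⟨x, t, rfl⟩
  have hbridge := bridgeA t [x] ([], 0)
  rw [show (([x] : List Int).length : Int) = 1 by simp] at hbridge
  rw [show ([x] : List Int) ++ t = x :: t by simp] at hbridge
  simp only [vspace, List.length_cons, List.drop_succ_cons, List.drop_zero]
  rw [show (((t.length + 1 : Nat)) : Int) = 1 + (t.length : Int) by push_cast; ring]
  rw [hbridge]
  rcases eq_or_ne t [] with rfl | ht
  · simp [loopA, gaps, PySem.List.pyGetD]
  · have hlast : PySem.List.pyGetD (x :: t) ((1 : Int) + (t.length : Int) - 1) 0 = t.getLastD 0 := by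
      rw [show ((1 : Int) + (t.length : Int) - 1) = ((t.length : Nat) : Int) by ring]
      rw [PySem.List.pyGetD_natCast]
      cases t with
      | nil => exact absurd rfl ht
      | cons w r =>
        rw [List.getD_eq_getElem _ _ (by simp)]
        rw [List.getLastD_eq_getLast?, List.getLast?_eq_getElem?]
        simp
        rfl
    rw [hlast]
    have hg := loopA_gaps t ht 1 0 []
    rw [show (1 : Int) - 0 = 1 by ring] at hg
    simpa using hg

-- ===== VERDICT (by name: the statements are the Claim_ definitions above) =====
theorem vspace_spec : Claim_equal_vspace := by
  intro xx _ hne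
  exact main_eq xx hne
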